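-- pv_equiv track=rewrite | github.com/markjoshwel/yanindeb | src/yanindeb.py | yanindeb_inject
-- ===== SOURCE A (Python) =====
-- def yanindeb_inject(html: str, post_number: int) -> str:
--     """injects semantic tags into marko-generated html"""
--
--     section = 0
--     new_html: str = "<header>"
--     window: str = ""
--
--     for char in html:
--         new_html += char
--         window += char
--
--         if window.endswith("</h2>"):
--             section += 1
--             new_html += (
--                 f'<p>Week {post_number:>02}</p> </header> <section id="s{section}">'
--             )
--             window = ""
--
--         elif any(
--             hr_type := [
--                 window.endswith("<hr>"),
--                 window.endswith("<hr/>"),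
--                 window.endswith("<hr />"),
--             ]
--         ):
--             hr_length: int = 4
--             match hr_type:
--                 case [True, False, False]:
--                     hr_length = 4
--                 case [False, True, False]:
--                     hr_length = 5
--                 case [False, False, True]:
--                     hr_length = 6
--
--             section += 1
--             new_html = (
--                 new_html[:-hr_length]
--                 + ("</section> " if section > 1 else "")
--                 + f'<section id="s{section}">'
--             )
--             window = ""
--
--         else:
--             continue
--
--         # unreachable if no match
--         window = ""
--
--     return new_html + ("</section>" if "<section" in new_html else "")
-- ===== SOURCE B (Python) =====
-- def yanindeb_inject(html: str, post_number: int) -> str: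
--     """injects semantic tags into marko-generated html"""
--
--     parts = ["<header>"]
--     section = 0
--     i = 0
--     n = len(html)
--     while i < n:
--         if html.startswith("</h2>", i):
--             section += 1
--             parts.append(f'</h2><p>Week {post_number:>02}</p> </header> <section id="s{section}">')
--             i += 5
--         elif html.startswith("<hr/>", i):
--             section += 1
--             parts.append(("</section> " if section > 1 else "") + f'<section id="s{section}">')
--             i += 5
--         elif html.startswith("<hr />", i):
--             section += 1
--             parts.append(("</section> " if section > 1 else "") + f'<section id="s{section}">')
--             i += 6
--         elif html.startswith("<hr>", i):
--             section += 1
--             parts.append(("</section> " if section > 1 else "") + f'<section id="s{section}">')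
--             i += 4
--         else:
--             parts.append(html[i])
--             i += 1
--     out = "".join(parts)
--     return out + ("</section>" if "<section" in out else "")
-- ===== Notes on version B (the rewrite author's own statement) =====
-- stated objective: alternative
-- what changed: Replaces A's char-by-char scan with a growing suffix window, endswith tests and backwards slicing of the output by a forward index scan that dispatches on startswith(tag, i), jumps past each matched marker, and joins collected parts once at the end.
import Mathlib
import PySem

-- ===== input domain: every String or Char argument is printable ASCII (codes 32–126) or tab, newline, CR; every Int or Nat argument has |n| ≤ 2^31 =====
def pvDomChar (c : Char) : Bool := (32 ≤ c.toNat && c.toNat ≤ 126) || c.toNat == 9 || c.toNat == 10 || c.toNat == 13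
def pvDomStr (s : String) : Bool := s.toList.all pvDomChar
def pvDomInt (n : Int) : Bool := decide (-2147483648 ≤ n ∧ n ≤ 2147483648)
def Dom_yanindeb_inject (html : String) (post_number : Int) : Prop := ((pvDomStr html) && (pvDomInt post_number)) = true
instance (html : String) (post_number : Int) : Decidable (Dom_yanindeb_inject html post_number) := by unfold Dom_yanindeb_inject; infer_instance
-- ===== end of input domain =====

-- B replaces A's char-by-char suffix-window scan (with backwards slicing of the output)
-- by a forward startswith-dispatch over marker tags that jumps the index past each tag;
-- objective: simpler/alternative decomposition, same observable result.

-- the four marker strings, as char lists (shared vocabulary of both ports)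
def pvM1 : List Char := ['<', '/', 'h', '2', '>']          -- "</h2>"
def pvM4 : List Char := ['<', 'h', 'r', '>']               -- "<hr>"
def pvM5 : List Char := ['<', 'h', 'r', '/', '>']          -- "<hr/>"
def pvM6 : List Char := ['<', 'h', 'r', ' ', '/', '>']     -- "<hr />"

-- f"{post_number:>02}": pad str(post_number) on the left with '0' to width 2 (exact)
def pvPad2 (n : Int) : List Char :=
  let s := (PySem.Int.toStr n).toList
  List.replicate (2 - s.length) '0' ++ s

-- the text injected after a kept "</h2>"
def pvAfterH2 (pn sec : Int) : List Char :=
  ("<p>Week ").toList ++ pvPad2 pn ++ ("</p> </header> <section id=\"s").toList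
    ++ (PySem.Int.toStr sec).toList ++ ("\">").toList

-- the text replacing a removed hr tag
def pvHrIns (sec : Int) : List Char :=
  (if sec > 1 then ("</section> ").toList else [])
    ++ ("<section id=\"s").toList ++ (PySem.Int.toStr sec).toList ++ ("\">").toList

-- ===== PORT A =====
-- one iteration of A's for-loop: append char to new_html and window, then the
-- endswith checks in A's order ("</h2>" first, then the three hr spellings)
def pvStepA (pn : Int) (st : Int × List Char × List Char) (c : Char) : Int × List Char × List Char :=
  let sec := st.1
  let out := st.2.1 ++ [c]
  let win := st.2.2 ++ [c]
  if pvM1 <:+ win then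
    (sec + 1, out ++ pvAfterH2 pn (sec + 1), [])
  else
    let t4 : Bool := decide (pvM4 <:+ win)
    let t5 : Bool := decide (pvM5 <:+ win)
    let t6 : Bool := decide (pvM6 <:+ win)
    if t4 || t5 || t6 then
      let hrLen : Nat :=
        if t4 && !t5 && !t6 then 4
        else if !t4 && t5 && !t6 then 5
        else if !t4 && !t5 && t6 then 6
        else 4
      -- new_html[:-hrLen] = take (length - hrLen): exact for hrLen > 0
      (sec + 1, (out.take (out.length - hrLen)) ++ pvHrIns (sec + 1), [])
    else (sec, out, win)

def yanindeb_inject (html : String) (post_number : Int) : String :=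
  let st := List.foldl (pvStepA post_number) (0, ("<header>").toList, []) html.toList
  let newHtml := st.2.1
  -- Python '"<section" in new_html' substring test = contiguous-infix test (exact)
  String.ofList (newHtml ++ (if ("<section").toList <:+: newHtml then ("</section>").toList else []))

-- ===== PORT B =====
-- B's while-loop: at each position try the tags "</h2>", "<hr/>", "<hr />", "<hr>"
-- as prefixes (html.startswith(tag, i)), jumping past a matched tag, else copy one char
def pvGoB (pn : Int) : Int → List Char → List Char → List Char
  | sec, acc, '<' :: '/' :: 'h' :: '2' :: '>' :: rest =>
      pvGoB pn (sec + 1) (acc ++ pvM1 ++ pvAfterH2 pn (sec + 1)) rest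
  | sec, acc, '<' :: 'h' :: 'r' :: '/' :: '>' :: rest =>
      pvGoB pn (sec + 1) (acc ++ pvHrIns (sec + 1)) rest
  | sec, acc, '<' :: 'h' :: 'r' :: ' ' :: '/' :: '>' :: rest =>
      pvGoB pn (sec + 1) (acc ++ pvHrIns (sec + 1)) rest
  | sec, acc, '<' :: 'h' :: 'r' :: '>' :: rest =>
      pvGoB pn (sec + 1) (acc ++ pvHrIns (sec + 1)) rest
  | sec, acc, c :: rest => pvGoB pn sec (acc ++ [c]) rest
  | _, acc, [] => acc

def yanindeb_inject_alt (html : String) (post_number : Int) : String :=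
  let out := pvGoB post_number 0 (("<header>").toList) html.toList
  String.ofList (out ++ (if ("<section").toList <:+: out then ("</section>").toList else []))

-- ===== PRECONDITION & SPEC =====
def Spec_yanindeb_inject (html : String) (post_number : Int) (out : String) : Prop := out = yanindeb_inject_alt html post_number
instance (html : String) (post_number : Int) (out : String) : Decidable (Spec_yanindeb_inject html post_number out) := by unfold Spec_yanindeb_inject; infer_instance

-- ===== CLAIM (what is proved, stated in full; the proofs are below) =====
def Claim_equal_yanindeb_inject : Prop := ∀ (html : String) (post_number : Int), Dom_yanindeb_inject html post_number → Spec_yanindeb_inject html post_number (yanindeb_inject html post_number)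

-- ===== LEMMAS AND PROOFS =====

def pvMarkers : List (List Char) := [pvM1, pvM4, pvM5, pvM6]

-- invariant: no marker occurrence starts inside A's current window
def pvInv (win l : List Char) : Prop :=
  ∀ M ∈ pvMarkers, ∀ w2 : List Char, w2 ≠ [] → w2 <:+ win → ¬ M <+: (w2 ++ l)

lemma pv_suffix_split {M a b : List Char} (h : M <:+ a ++ b) :
    M <:+ b ∨ ∃ c, c ≠ [] ∧ c <:+ a ∧ M = c ++ b := by
  obtain ⟨t, ht⟩ := h
  rcases List.append_eq_append_iff.mp ht with ⟨a', h1, h2⟩ | ⟨c', h1, h2⟩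
  · rcases eq_or_ne a' [] with rfl | hne
    · exact Or.inl (by simp [h2])
    · exact Or.inr ⟨a', hne, ⟨t, h1.symm⟩, h2⟩
  · exact Or.inl ⟨c', h2.symm⟩

lemma pv_key {M win p l : List Char}
    (hInv : ∀ w2 : List Char, w2 ≠ [] → w2 <:+ win → ¬ M <+: (w2 ++ l))
    (hp : p <+: l) (hMp : ¬ M <:+ p) : ¬ M <:+ win ++ p := by
  intro h
  rcases pv_suffix_split h with h' | ⟨c, hc, hca, rfl⟩
  · exact hMp h'
  · obtain ⟨t, rfl⟩ := hp
    exact hInv c hc hca ⟨t, by simp⟩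

lemma pv_no_marker_suffix {win p l : List Char} (hInv : pvInv win l) (hp : p <+: l)
    (hne : ∀ M ∈ pvMarkers, ¬ M <:+ p) : ∀ M ∈ pvMarkers, ¬ M <:+ win ++ p :=
  fun M hM => pv_key (hInv M hM) hp (hne M hM)

lemma pvInv_nil (l : List Char) : pvInv [] l := by
  intro M _ w2 hne hsuf
  exact absurd (List.suffix_nil.mp hsuf) hne

lemma pvInv_snoc {win l : List Char} {c : Char} (hInv : pvInv win (c :: l))
    (hnp : ∀ M ∈ pvMarkers, ¬ M <+: (c :: l)) : pvInv (win ++ [c]) l := by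
  intro M hM w2 hne hsuf
  rcases pv_suffix_split hsuf with h | ⟨d, hd, hda, rfl⟩
  · have hw : w2 = [c] := by
      obtain ⟨t, ht⟩ := h
      cases t with
      | nil => simpa using ht
      | cons a t' =>
        exfalso
        rw [List.cons_append] at ht
        injection ht with _ h2
        exact hne (List.append_eq_nil_iff.mp h2).2
    subst hw
    simpa using hnp M hM
  · have h' := hInv M hM d hd hda
    simpa [List.append_assoc] using h'

-- single-step evaluation lemmas for A
lemma pvStepA_no (pn sec : Int) (out win : List Char) (c : Char)
    (h1 : ¬ pvM1 <:+ win ++ [c]) (h4 : ¬ pvM4 <:+ win ++ [c])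
    (h5 : ¬ pvM5 <:+ win ++ [c]) (h6 : ¬ pvM6 <:+ win ++ [c]) :
    pvStepA pn (sec, out, win) c = (sec, out ++ [c], win ++ [c]) := by
  simp [pvStepA, h1, h4, h5, h6]

lemma pvStepA_h2 (pn sec : Int) (out win : List Char) (c : Char)
    (h1 : pvM1 <:+ win ++ [c]) :
    pvStepA pn (sec, out, win) c = (sec + 1, out ++ [c] ++ pvAfterH2 pn (sec + 1), []) := by
  simp [pvStepA, h1]

lemma pvStepA_hr (pn sec : Int) (out win : List Char) (c : Char) (k : Nat)
    (h1 : ¬ pvM1 <:+ win ++ [c])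
    (h4 : (pvM4 <:+ win ++ [c]) ↔ k = 4) (h5 : (pvM5 <:+ win ++ [c]) ↔ k = 5)
    (h6 : (pvM6 <:+ win ++ [c]) ↔ k = 6) (hk : k = 4 ∨ k = 5 ∨ k = 6) :
    pvStepA pn (sec, out, win) c =
      (sec + 1, ((out ++ [c]).take ((out ++ [c]).length - k)) ++ pvHrIns (sec + 1), []) := by
  rcases hk with rfl | rfl | rfl <;>
    simp [pvStepA, h1, h4, h5, h6]

lemma pv_markers_not_suffix_singleton (c : Char) : ∀ M ∈ pvMarkers, ¬ M <:+ [c] := by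
  intro M hM h
  have hl := h.length_le
  simp [pvMarkers] at hM
  rcases hM with rfl | rfl | rfl | rfl <;> simp [pvM1, pvM4, pvM5, pvM6] at hl

-- fold A through one plain text character
lemma pvFoldA_cons (pn sec : Int) (out win : List Char) (c : Char) (rest : List Char)
    (hInv : pvInv win (c :: rest)) :
    List.foldl (pvStepA pn) (sec, out, win) (c :: rest)
      = List.foldl (pvStepA pn) (sec, out ++ [c], win ++ [c]) rest := by
  have hp : [c] <+: c :: rest := ⟨rest, rfl⟩
  have h := pv_no_marker_suffix hInv hp (pv_markers_not_suffix_singleton c)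
  rw [List.foldl_cons,
    pvStepA_no pn sec out win c (h pvM1 (by simp [pvMarkers])) (h pvM4 (by simp [pvMarkers]))
      (h pvM5 (by simp [pvMarkers])) (h pvM6 (by simp [pvMarkers]))]

-- fold A through a "</h2>" marker
lemma pvFoldA_h2 (pn sec : Int) (out win rest : List Char) (hInv : pvInv win (pvM1 ++ rest)) :
    List.foldl (pvStepA pn) (sec, out, win) (pvM1 ++ rest)
      = List.foldl (pvStepA pn) (sec + 1, out ++ pvM1 ++ pvAfterH2 pn (sec + 1), []) rest := by
  have hp1 : ['<'] <+: pvM1 ++ rest := ⟨['/', 'h', '2', '>'] ++ rest, by simp [pvM1]⟩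
  have hp2 : ['<', '/'] <+: pvM1 ++ rest := ⟨['h', '2', '>'] ++ rest, by simp [pvM1]⟩
  have hp3 : ['<', '/', 'h'] <+: pvM1 ++ rest := ⟨['2', '>'] ++ rest, by simp [pvM1]⟩
  have hp4 : ['<', '/', 'h', '2'] <+: pvM1 ++ rest := ⟨['>'] ++ rest, by simp [pvM1]⟩
  have hp5 : pvM1 <+: pvM1 ++ rest := ⟨rest, rfl⟩
  have n1 := pv_no_marker_suffix hInv hp1 (by decide)
  have n2 := pv_no_marker_suffix hInv hp2 (by decide)
  have n3 := pv_no_marker_suffix hInv hp3 (by decide)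
  have n4 := pv_no_marker_suffix hInv hp4 (by decide)
  have e1 : ∀ M ∈ pvMarkers, ¬ M <:+ (win ++ ['<']) := n1
  have e2 : ∀ M ∈ pvMarkers, ¬ M <:+ ((win ++ ['<']) ++ ['/']) := by
    intro M hM; simpa [List.append_assoc] using n2 M hM
  have e3 : ∀ M ∈ pvMarkers, ¬ M <:+ (((win ++ ['<']) ++ ['/']) ++ ['h']) := by
    intro M hM; simpa [List.append_assoc] using n3 M hM
  have e4 : ∀ M ∈ pvMarkers, ¬ M <:+ ((((win ++ ['<']) ++ ['/']) ++ ['h']) ++ ['2']) := by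
    intro M hM; simpa [List.append_assoc] using n4 M hM
  have hyes : pvM1 <:+ ((((win ++ ['<']) ++ ['/']) ++ ['h']) ++ ['2']) ++ ['>'] := by
    refine ⟨win, ?_⟩; simp [pvM1]
  show List.foldl (pvStepA pn) (sec, out, win) ('<' :: '/' :: 'h' :: '2' :: '>' :: rest) = _
  rw [List.foldl_cons, pvStepA_no pn sec out win '<'
      (e1 pvM1 (by simp [pvMarkers])) (e1 pvM4 (by simp [pvMarkers]))
      (e1 pvM5 (by simp [pvMarkers])) (e1 pvM6 (by simp [pvMarkers])),
    List.foldl_cons, pvStepA_no pn sec _ _ '/'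
      (e2 pvM1 (by simp [pvMarkers])) (e2 pvM4 (by simp [pvMarkers]))
      (e2 pvM5 (by simp [pvMarkers])) (e2 pvM6 (by simp [pvMarkers])),
    List.foldl_cons, pvStepA_no pn sec _ _ 'h'
      (e3 pvM1 (by simp [pvMarkers])) (e3 pvM4 (by simp [pvMarkers]))
      (e3 pvM5 (by simp [pvMarkers])) (e3 pvM6 (by simp [pvMarkers])),
    List.foldl_cons, pvStepA_no pn sec _ _ '2'
      (e4 pvM1 (by simp [pvMarkers])) (e4 pvM4 (by simp [pvMarkers]))
      (e4 pvM5 (by simp [pvMarkers])) (e4 pvM6 (by simp [pvMarkers])),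
    List.foldl_cons, pvStepA_h2 pn sec _ _ '>' hyes]
  congr 2
  simp [pvM1]

-- fold A through an hr marker m of length k: the appended tag is sliced off again
lemma pv_take_helper (out m : List Char) (k : Nat) (hk : m.length = k) :
    (out ++ m).take ((out ++ m).length - k) = out := by
  have : (out ++ m).length - k = out.length := by simp [hk]
  rw [this, List.take_left]

lemma pvFoldA_hr4 (pn sec : Int) (out win rest : List Char) (hInv : pvInv win (pvM4 ++ rest)) :
    List.foldl (pvStepA pn) (sec, out, win) (pvM4 ++ rest)
      = List.foldl (pvStepA pn) (sec + 1, out ++ pvHrIns (sec + 1), []) rest := by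
  have hp1 : ['<'] <+: pvM4 ++ rest := ⟨['h', 'r', '>'] ++ rest, by simp [pvM4]⟩
  have hp2 : ['<', 'h'] <+: pvM4 ++ rest := ⟨['r', '>'] ++ rest, by simp [pvM4]⟩
  have hp3 : ['<', 'h', 'r'] <+: pvM4 ++ rest := ⟨['>'] ++ rest, by simp [pvM4]⟩
  have hp4 : pvM4 <+: pvM4 ++ rest := ⟨rest, rfl⟩
  have n1 := pv_no_marker_suffix hInv hp1 (by decide)
  have n2 := pv_no_marker_suffix hInv hp2 (by decide)
  have n3 := pv_no_marker_suffix hInv hp3 (by decide)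
  have e2 : ∀ M ∈ pvMarkers, ¬ M <:+ ((win ++ ['<']) ++ ['h']) := by
    intro M hM; simpa [List.append_assoc] using n2 M hM
  have e3 : ∀ M ∈ pvMarkers, ¬ M <:+ (((win ++ ['<']) ++ ['h']) ++ ['r']) := by
    intro M hM; simpa [List.append_assoc] using n3 M hM
  have hwin4 : (((win ++ ['<']) ++ ['h']) ++ ['r']) ++ ['>'] = win ++ pvM4 := by
    simp [pvM4]
  have hyes : pvM4 <:+ (((win ++ ['<']) ++ ['h']) ++ ['r']) ++ ['>'] := by
    rw [hwin4]; exact ⟨win, rfl⟩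
  have no1 : ¬ pvM1 <:+ (((win ++ ['<']) ++ ['h']) ++ ['r']) ++ ['>'] := by
    rw [hwin4]; exact pv_key (hInv pvM1 (by simp [pvMarkers])) hp4 (by decide)
  have no5 : ¬ pvM5 <:+ (((win ++ ['<']) ++ ['h']) ++ ['r']) ++ ['>'] := by
    rw [hwin4]; exact pv_key (hInv pvM5 (by simp [pvMarkers])) hp4 (by decide)
  have no6 : ¬ pvM6 <:+ (((win ++ ['<']) ++ ['h']) ++ ['r']) ++ ['>'] := by
    rw [hwin4]; exact pv_key (hInv pvM6 (by simp [pvMarkers])) hp4 (by decide)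
  show List.foldl (pvStepA pn) (sec, out, win) ('<' :: 'h' :: 'r' :: '>' :: rest) = _
  rw [List.foldl_cons, pvStepA_no pn sec out win '<'
      (n1 pvM1 (by simp [pvMarkers])) (n1 pvM4 (by simp [pvMarkers]))
      (n1 pvM5 (by simp [pvMarkers])) (n1 pvM6 (by simp [pvMarkers])),
    List.foldl_cons, pvStepA_no pn sec _ _ 'h'
      (e2 pvM1 (by simp [pvMarkers])) (e2 pvM4 (by simp [pvMarkers]))
      (e2 pvM5 (by simp [pvMarkers])) (e2 pvM6 (by simp [pvMarkers])),
    List.foldl_cons, pvStepA_no pn sec _ _ 'r'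
      (e3 pvM1 (by simp [pvMarkers])) (e3 pvM4 (by simp [pvMarkers]))
      (e3 pvM5 (by simp [pvMarkers])) (e3 pvM6 (by simp [pvMarkers])),
    List.foldl_cons, pvStepA_hr pn sec _ _ '>' 4 no1
      (iff_of_true hyes rfl) (iff_of_false no5 (by decide)) (iff_of_false no6 (by decide))
      (Or.inl rfl)]
  congr 2
  have : (((out ++ ['<']) ++ ['h']) ++ ['r']) ++ ['>'] = out ++ pvM4 := by simp [pvM4]
  rw [this, pv_take_helper out pvM4 4 (by decide)]

lemma pvFoldA_hr5 (pn sec : Int) (out win rest : List Char) (hInv : pvInv win (pvM5 ++ rest)) :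
    List.foldl (pvStepA pn) (sec, out, win) (pvM5 ++ rest)
      = List.foldl (pvStepA pn) (sec + 1, out ++ pvHrIns (sec + 1), []) rest := by
  have hp1 : ['<'] <+: pvM5 ++ rest := ⟨['h', 'r', '/', '>'] ++ rest, by simp [pvM5]⟩
  have hp2 : ['<', 'h'] <+: pvM5 ++ rest := ⟨['r', '/', '>'] ++ rest, by simp [pvM5]⟩
  have hp3 : ['<', 'h', 'r'] <+: pvM5 ++ rest := ⟨['/', '>'] ++ rest, by simp [pvM5]⟩
  have hp4 : ['<', 'h', 'r', '/'] <+: pvM5 ++ rest := ⟨['>'] ++ rest, by simp [pvM5]⟩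
  have hp5 : pvM5 <+: pvM5 ++ rest := ⟨rest, rfl⟩
  have n1 := pv_no_marker_suffix hInv hp1 (by decide)
  have n2 := pv_no_marker_suffix hInv hp2 (by decide)
  have n3 := pv_no_marker_suffix hInv hp3 (by decide)
  have n4 := pv_no_marker_suffix hInv hp4 (by decide)
  have e2 : ∀ M ∈ pvMarkers, ¬ M <:+ ((win ++ ['<']) ++ ['h']) := by
    intro M hM; simpa [List.append_assoc] using n2 M hM
  have e3 : ∀ M ∈ pvMarkers, ¬ M <:+ (((win ++ ['<']) ++ ['h']) ++ ['r']) := by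
    intro M hM; simpa [List.append_assoc] using n3 M hM
  have e4 : ∀ M ∈ pvMarkers, ¬ M <:+ ((((win ++ ['<']) ++ ['h']) ++ ['r']) ++ ['/']) := by
    intro M hM; simpa [List.append_assoc] using n4 M hM
  have hwin5 : ((((win ++ ['<']) ++ ['h']) ++ ['r']) ++ ['/']) ++ ['>'] = win ++ pvM5 := by
    simp [pvM5]
  have hyes : pvM5 <:+ ((((win ++ ['<']) ++ ['h']) ++ ['r']) ++ ['/']) ++ ['>'] := by
    rw [hwin5]; exact ⟨win, rfl⟩
  have no1 : ¬ pvM1 <:+ ((((win ++ ['<']) ++ ['h']) ++ ['r']) ++ ['/']) ++ ['>'] := by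
    rw [hwin5]; exact pv_key (hInv pvM1 (by simp [pvMarkers])) hp5 (by decide)
  have no4 : ¬ pvM4 <:+ ((((win ++ ['<']) ++ ['h']) ++ ['r']) ++ ['/']) ++ ['>'] := by
    rw [hwin5]; exact pv_key (hInv pvM4 (by simp [pvMarkers])) hp5 (by decide)
  have no6 : ¬ pvM6 <:+ ((((win ++ ['<']) ++ ['h']) ++ ['r']) ++ ['/']) ++ ['>'] := by
    rw [hwin5]; exact pv_key (hInv pvM6 (by simp [pvMarkers])) hp5 (by decide)
  show List.foldl (pvStepA pn) (sec, out, win) ('<' :: 'h' :: 'r' :: '/' :: '>' :: rest) = _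
  rw [List.foldl_cons, pvStepA_no pn sec out win '<'
      (n1 pvM1 (by simp [pvMarkers])) (n1 pvM4 (by simp [pvMarkers]))
      (n1 pvM5 (by simp [pvMarkers])) (n1 pvM6 (by simp [pvMarkers])),
    List.foldl_cons, pvStepA_no pn sec _ _ 'h'
      (e2 pvM1 (by simp [pvMarkers])) (e2 pvM4 (by simp [pvMarkers]))
      (e2 pvM5 (by simp [pvMarkers])) (e2 pvM6 (by simp [pvMarkers])),
    List.foldl_cons, pvStepA_no pn sec _ _ 'r'
      (e3 pvM1 (by simp [pvMarkers])) (e3 pvM4 (by simp [pvMarkers]))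
      (e3 pvM5 (by simp [pvMarkers])) (e3 pvM6 (by simp [pvMarkers])),
    List.foldl_cons, pvStepA_no pn sec _ _ '/'
      (e4 pvM1 (by simp [pvMarkers])) (e4 pvM4 (by simp [pvMarkers]))
      (e4 pvM5 (by simp [pvMarkers])) (e4 pvM6 (by simp [pvMarkers])),
    List.foldl_cons, pvStepA_hr pn sec _ _ '>' 5 no1
      (iff_of_false no4 (by decide)) (iff_of_true hyes rfl) (iff_of_false no6 (by decide))
      (Or.inr (Or.inl rfl))]
  congr 2
  have : ((((out ++ ['<']) ++ ['h']) ++ ['r']) ++ ['/']) ++ ['>'] = out ++ pvM5 := by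
    simp [pvM5]
  rw [this, pv_take_helper out pvM5 5 (by decide)]

lemma pvFoldA_hr6 (pn sec : Int) (out win rest : List Char) (hInv : pvInv win (pvM6 ++ rest)) :
    List.foldl (pvStepA pn) (sec, out, win) (pvM6 ++ rest)
      = List.foldl (pvStepA pn) (sec + 1, out ++ pvHrIns (sec + 1), []) rest := by
  have hp1 : ['<'] <+: pvM6 ++ rest := ⟨['h', 'r', ' ', '/', '>'] ++ rest, by simp [pvM6]⟩
  have hp2 : ['<', 'h'] <+: pvM6 ++ rest := ⟨['r', ' ', '/', '>'] ++ rest, by simp [pvM6]⟩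
  have hp3 : ['<', 'h', 'r'] <+: pvM6 ++ rest := ⟨[' ', '/', '>'] ++ rest, by simp [pvM6]⟩
  have hp4 : ['<', 'h', 'r', ' '] <+: pvM6 ++ rest := ⟨['/', '>'] ++ rest, by simp [pvM6]⟩
  have hp5 : ['<', 'h', 'r', ' ', '/'] <+: pvM6 ++ rest := ⟨['>'] ++ rest, by simp [pvM6]⟩
  have hp6 : pvM6 <+: pvM6 ++ rest := ⟨rest, rfl⟩
  have n1 := pv_no_marker_suffix hInv hp1 (by decide)
  have n2 := pv_no_marker_suffix hInv hp2 (by decide)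
  have n3 := pv_no_marker_suffix hInv hp3 (by decide)
  have n4 := pv_no_marker_suffix hInv hp4 (by decide)
  have n5 := pv_no_marker_suffix hInv hp5 (by decide)
  have e2 : ∀ M ∈ pvMarkers, ¬ M <:+ ((win ++ ['<']) ++ ['h']) := by
    intro M hM; simpa [List.append_assoc] using n2 M hM
  have e3 : ∀ M ∈ pvMarkers, ¬ M <:+ (((win ++ ['<']) ++ ['h']) ++ ['r']) := by
    intro M hM; simpa [List.append_assoc] using n3 M hM
  have e4 : ∀ M ∈ pvMarkers, ¬ M <:+ ((((win ++ ['<']) ++ ['h']) ++ ['r']) ++ [' ']) := by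
    intro M hM; simpa [List.append_assoc] using n4 M hM
  have e5 : ∀ M ∈ pvMarkers, ¬ M <:+ (((((win ++ ['<']) ++ ['h']) ++ ['r']) ++ [' ']) ++ ['/']) := by
    intro M hM; simpa [List.append_assoc] using n5 M hM
  have hwin6 : (((((win ++ ['<']) ++ ['h']) ++ ['r']) ++ [' ']) ++ ['/']) ++ ['>'] = win ++ pvM6 := by
    simp [pvM6]
  have hyes : pvM6 <:+ (((((win ++ ['<']) ++ ['h']) ++ ['r']) ++ [' ']) ++ ['/']) ++ ['>'] := by
    rw [hwin6]; exact ⟨win, rfl⟩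
  have no1 : ¬ pvM1 <:+ (((((win ++ ['<']) ++ ['h']) ++ ['r']) ++ [' ']) ++ ['/']) ++ ['>'] := by
    rw [hwin6]; exact pv_key (hInv pvM1 (by simp [pvMarkers])) hp6 (by decide)
  have no4 : ¬ pvM4 <:+ (((((win ++ ['<']) ++ ['h']) ++ ['r']) ++ [' ']) ++ ['/']) ++ ['>'] := by
    rw [hwin6]; exact pv_key (hInv pvM4 (by simp [pvMarkers])) hp6 (by decide)
  have no5 : ¬ pvM5 <:+ (((((win ++ ['<']) ++ ['h']) ++ ['r']) ++ [' ']) ++ ['/']) ++ ['>'] := by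
    rw [hwin6]; exact pv_key (hInv pvM5 (by simp [pvMarkers])) hp6 (by decide)
  show List.foldl (pvStepA pn) (sec, out, win) ('<' :: 'h' :: 'r' :: ' ' :: '/' :: '>' :: rest) = _
  rw [List.foldl_cons, pvStepA_no pn sec out win '<'
      (n1 pvM1 (by simp [pvMarkers])) (n1 pvM4 (by simp [pvMarkers]))
      (n1 pvM5 (by simp [pvMarkers])) (n1 pvM6 (by simp [pvMarkers])),
    List.foldl_cons, pvStepA_no pn sec _ _ 'h'
      (e2 pvM1 (by simp [pvMarkers])) (e2 pvM4 (by simp [pvMarkers]))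
      (e2 pvM5 (by simp [pvMarkers])) (e2 pvM6 (by simp [pvMarkers])),
    List.foldl_cons, pvStepA_no pn sec _ _ 'r'
      (e3 pvM1 (by simp [pvMarkers])) (e3 pvM4 (by simp [pvMarkers]))
      (e3 pvM5 (by simp [pvMarkers])) (e3 pvM6 (by simp [pvMarkers])),
    List.foldl_cons, pvStepA_no pn sec _ _ ' '
      (e4 pvM1 (by simp [pvMarkers])) (e4 pvM4 (by simp [pvMarkers]))
      (e4 pvM5 (by simp [pvMarkers])) (e4 pvM6 (by simp [pvMarkers])),
    List.foldl_cons, pvStepA_no pn sec _ _ '/'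
      (e5 pvM1 (by simp [pvMarkers])) (e5 pvM4 (by simp [pvMarkers]))
      (e5 pvM5 (by simp [pvMarkers])) (e5 pvM6 (by simp [pvMarkers])),
    List.foldl_cons, pvStepA_hr pn sec _ _ '>' 6 no1
      (iff_of_false no4 (by decide)) (iff_of_false no5 (by decide)) (iff_of_true hyes rfl)
      (Or.inr (Or.inr rfl))]
  congr 2
  have : (((((out ++ ['<']) ++ ['h']) ++ ['r']) ++ [' ']) ++ ['/']) ++ ['>'] = out ++ pvM6 := by
    simp [pvM6]
  rw [this, pv_take_helper out pvM6 6 (by decide)]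

-- default-branch equation for B
lemma pvGoB_cons (pn sec : Int) (acc : List Char) (c : Char) (rest : List Char)
    (h1 : ¬ pvM1 <+: (c :: rest)) (h5 : ¬ pvM5 <+: (c :: rest))
    (h6 : ¬ pvM6 <+: (c :: rest)) (h4 : ¬ pvM4 <+: (c :: rest)) :
    pvGoB pn sec acc (c :: rest) = pvGoB pn sec (acc ++ [c]) rest := by
  conv_lhs => rw [pvGoB.eq_def]
  split
  · rename_i rest' heq
    exact absurd (show pvM1 <+: c :: rest from ⟨rest', by rw [heq]; simp [pvM1]⟩) h1
  · rename_i rest' heq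
    exact absurd (show pvM5 <+: c :: rest from ⟨rest', by rw [heq]; simp [pvM5]⟩) h5
  · rename_i rest' heq
    exact absurd (show pvM6 <+: c :: rest from ⟨rest', by rw [heq]; simp [pvM6]⟩) h6
  · rename_i rest' heq
    exact absurd (show pvM4 <+: c :: rest from ⟨rest', by rw [heq]; simp [pvM4]⟩) h4
  · rename_i heq
    injection heq with hc hr
    subst hc; subst hr
    rfl
  · rename_i heq
    exact absurd heq (by simp)

-- main induction: A's fold equals B's scanner under the window invariant
lemma pv_main (pn : Int) : ∀ (n : Nat) (l : List Char), l.length ≤ n →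
    ∀ (sec : Int) (out win : List Char), pvInv win l →
      (List.foldl (pvStepA pn) (sec, out, win) l).2.1 = pvGoB pn sec out l := by
  intro n
  induction n with
  | zero =>
    intro l hl sec out win _
    have : l = [] := List.length_eq_zero_iff.mp (Nat.le_zero.mp hl)
    subst this
    rfl
  | succ n ih =>
    intro l hl sec out win hInv
    by_cases h1 : pvM1 <+: l
    · obtain ⟨rest, rfl⟩ := h1
      rw [pvFoldA_h2 pn sec out win rest hInv]
      have hgb : pvGoB pn sec out (pvM1 ++ rest)
          = pvGoB pn (sec + 1) (out ++ pvM1 ++ pvAfterH2 pn (sec + 1)) rest := rfl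
      rw [hgb]
      exact ih rest (by simp [pvM1] at hl ⊢; omega) (sec + 1) _ [] (pvInv_nil rest)
    · by_cases h5 : pvM5 <+: l
      · obtain ⟨rest, rfl⟩ := h5
        rw [pvFoldA_hr5 pn sec out win rest hInv]
        have hgb : pvGoB pn sec out (pvM5 ++ rest)
            = pvGoB pn (sec + 1) (out ++ pvHrIns (sec + 1)) rest := rfl
        rw [hgb]
        exact ih rest (by simp [pvM5] at hl ⊢; omega) (sec + 1) _ [] (pvInv_nil rest)
      · by_cases h6 : pvM6 <+: l
        · obtain ⟨rest, rfl⟩ := h6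
          rw [pvFoldA_hr6 pn sec out win rest hInv]
          have hgb : pvGoB pn sec out (pvM6 ++ rest)
              = pvGoB pn (sec + 1) (out ++ pvHrIns (sec + 1)) rest := rfl
          rw [hgb]
          exact ih rest (by simp [pvM6] at hl ⊢; omega) (sec + 1) _ [] (pvInv_nil rest)
        · by_cases h4 : pvM4 <+: l
          · obtain ⟨rest, rfl⟩ := h4
            rw [pvFoldA_hr4 pn sec out win rest hInv]
            have hgb : pvGoB pn sec out (pvM4 ++ rest)
                = pvGoB pn (sec + 1) (out ++ pvHrIns (sec + 1)) rest := rfl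
            rw [hgb]
            exact ih rest (by simp [pvM4] at hl ⊢; omega) (sec + 1) _ [] (pvInv_nil rest)
          · cases l with
            | nil => rfl
            | cons c rest =>
              have hnp : ∀ M ∈ pvMarkers, ¬ M <+: (c :: rest) := by
                intro M hM
                simp [pvMarkers] at hM
                rcases hM with rfl | rfl | rfl | rfl
                · exact h1
                · exact h4
                · exact h5
                · exact h6
              rw [pvFoldA_cons pn sec out win c rest hInv,
                pvGoB_cons pn sec out c rest h1 h5 h6 h4]
              exact ih rest (by simp at hl; omega) sec (out ++ [c]) (win ++ [c])
                (pvInv_snoc hInv hnp)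

-- ===== VERDICT (by name: the statement is the Claim_ definition above) =====
theorem yanindeb_inject_spec : Claim_equal_yanindeb_inject := by
  unfold Claim_equal_yanindeb_inject Spec_yanindeb_inject
  intro html pn _
  unfold yanindeb_inject yanindeb_inject_alt
  have h := pv_main pn html.toList.length html.toList le_rfl 0 (("<header>").toList) []
    (pvInv_nil html.toList)
  simp only []
  rw [h]
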